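-- pv_equiv track=rewrite | github.com/aniketGhetla/Football | formation_smoothing.py | stabilize_formations
-- ===== SOURCE A (Python) =====
-- def stabilize_formations(team_formations_per_frame, min_persist=2880):
--     def stabilize_sequence(sequence):
--         stable = []
--         current = sequence[0]
--         counter = 1
--         candidate = current
--
--         for i in range(1, len(sequence)):
--             if sequence[i] == candidate:
--                 counter += 1
--             else:
--                 candidate = sequence[i]
--                 counter = 1
--
--             if counter >= min_persist:
--                 current = candidate
--
--             stable.append(current)
--
--         return stable
--
--     # Split into sequences per team
--     team1_seq = [frame.get(1, "Unknown") for frame in team_formations_per_frame]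
--     team2_seq = [frame.get(2, "Unknown") for frame in team_formations_per_frame]
--
--     # Stabilize each team's formation sequence
--     team1_seq = stabilize_sequence(team1_seq)
--     team2_seq = stabilize_sequence(team2_seq)
--
--     # Repack the stabilized results into frame dicts
--     stabilized = []
--     for f1, f2 in zip(team1_seq, team2_seq):
--         stabilized.append({1: f1, 2: f2})
--
--     return stabilized
-- ===== SOURCE B (Python) =====
-- from itertools import groupby
--
--
-- def stabilize_formations(team_formations_per_frame, min_persist=2880):
--     # Run-length decomposition: group each team's sequence into (value, length)
--     # runs, then walk the runs, flipping `current` at the absolute frame index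
--     # where a run's persistence first reaches min_persist. One stabilized value
--     # is emitted per frame starting at index 1 (the first frame is dropped).
--     def stabilize(seq):
--         current = seq[0]  # empty input raises IndexError, as intended
--         out = []
--         pos = 0  # start index of the current run
--         for value, group in groupby(seq):
--             length = sum(1 for _ in group)
--             flip = pos + min_persist - 1  # frame where this run becomes stable
--             for i in range(max(pos, 1), pos + length):
--                 if i >= flip:
--                     current = value
--                 out.append(current)
--             pos += length
--         return out
--
--     team1 = stabilize([frame.get(1, "Unknown") for frame in team_formations_per_frame])
--     team2 = stabilize([frame.get(2, "Unknown") for frame in team_formations_per_frame])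
--     return [{1: f1, 2: f2} for f1, f2 in zip(team1, team2)]
-- ===== Notes on version B (the rewrite author's own statement) =====
-- stated objective: alternative
-- what changed: B replaces A's per-frame candidate/counter state machine by a run-length decomposition (itertools.groupby) of each team's sequence, reconstructing the stabilized stream by flipping `current` at the absolute frame index where a run's persistence first reaches min_persist.
import Mathlib
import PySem

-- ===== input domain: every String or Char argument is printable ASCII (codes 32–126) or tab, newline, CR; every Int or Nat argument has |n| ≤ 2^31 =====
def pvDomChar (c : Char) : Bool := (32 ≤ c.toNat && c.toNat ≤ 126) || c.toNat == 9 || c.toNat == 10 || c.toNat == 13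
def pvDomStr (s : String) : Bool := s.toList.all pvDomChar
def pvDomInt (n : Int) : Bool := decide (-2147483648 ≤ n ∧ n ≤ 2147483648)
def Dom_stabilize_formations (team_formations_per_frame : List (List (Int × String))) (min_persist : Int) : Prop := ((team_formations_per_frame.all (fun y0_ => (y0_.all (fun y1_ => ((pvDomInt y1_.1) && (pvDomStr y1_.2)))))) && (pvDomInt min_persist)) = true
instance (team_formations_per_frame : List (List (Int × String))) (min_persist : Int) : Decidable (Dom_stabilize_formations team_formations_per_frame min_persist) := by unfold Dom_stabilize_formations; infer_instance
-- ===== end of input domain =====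

-- B replaces A's per-frame candidate/counter loop by a run-length decomposition of each
-- team's sequence, flipping `current` at the absolute frame where a run first persists
-- min_persist frames (objective: alternative decomposition, same cost).

-- ===== PORT A =====
-- one iteration of A's `for i in range(1, len(sequence))` loop; state = (current, counter, candidate, stable)
def pvStepA (min_persist : Int) (st : String × Int × String × List String) (x : String) :
    String × Int × String × List String :=
  let cand' := if x = st.2.2.1 then st.2.2.1 else x
  let cnt'  := if x = st.2.2.1 then st.2.1 + 1 else 1
  let cur'  := if cnt' ≥ min_persist then cand' else st.1
  (cur', cnt', cand', st.2.2.2 ++ [cur'])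

-- A's inner `stabilize_sequence`; Python raises IndexError on [], excluded by Pre_
def pvStabA (min_persist : Int) (seq : List String) : List String :=
  match seq with
  | [] => []
  | s0 :: rest => (rest.foldl (pvStepA min_persist) (s0, 1, s0, [])).2.2.2

def stabilize_formations (team_formations_per_frame : List (List (Int × String))) (min_persist : Int) : List (List (Int × String)) :=
  let team1_seq := team_formations_per_frame.map (fun frame => PySem.Dict.getD (PySem.Dict.mk frame) 1 "Unknown")
  let team2_seq := team_formations_per_frame.map (fun frame => PySem.Dict.getD (PySem.Dict.mk frame) 2 "Unknown")
  let t1 := pvStabA min_persist team1_seq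
  let t2 := pvStabA min_persist team2_seq
  (t1.zip t2).foldl (fun acc fp => acc ++ [[(1, fp.1), (2, fp.2)]]) []

-- ===== PORT B =====
-- itertools.groupby: the run-length decomposition [(value, run length), …] of a list
def pvRunsAux (x : String) : List (String × Nat) → List (String × Nat)
  | [] => [(x, 1)]
  | (v, n) :: rest => if x = v then (v, n + 1) :: rest else (x, 1) :: (v, n) :: rest

def pvRuns : List String → List (String × Nat)
  | [] => []
  | x :: xs => pvRunsAux x (pvRuns xs)

-- one step of B's inner `for i in range(max(pos,1), pos+length)` loop; state = (current, out)
def pvEmitB (min_persist pos : Int) (v : String) (st : String × List String) (i : Int) :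
    String × List String :=
  let cur := if i ≥ pos + min_persist - 1 then v else st.1
  (cur, st.2 ++ [cur])

-- one step of B's `for value, group in groupby(seq)` loop; state = (pos, current, out)
def pvStepB (min_persist : Int) (st : Int × String × List String) (r : String × Nat) :
    Int × String × List String :=
  let res := (PySem.List.pyRange (max st.1 1) (st.1 + (r.2 : Int)) 1).foldl
      (pvEmitB min_persist st.1 r.1) (st.2.1, st.2.2)
  (st.1 + (r.2 : Int), res.1, res.2)

-- B's `stabilize`; Python raises IndexError on [], excluded by Pre_
def pvStabB (min_persist : Int) (seq : List String) : List String :=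
  match seq with
  | [] => []
  | s0 :: _ => ((pvRuns seq).foldl (pvStepB min_persist) (0, s0, [])).2.2

def stabilize_formations_alt (team_formations_per_frame : List (List (Int × String))) (min_persist : Int) : List (List (Int × String)) :=
  let t1 := pvStabB min_persist (team_formations_per_frame.map (fun frame => PySem.Dict.getD (PySem.Dict.mk frame) 1 "Unknown"))
  let t2 := pvStabB min_persist (team_formations_per_frame.map (fun frame => PySem.Dict.getD (PySem.Dict.mk frame) 2 "Unknown"))
  (t1.zip t2).map (fun fp => [(1, fp.1), (2, fp.2)])

-- ===== PRECONDITION & SPEC =====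
-- Pre_ excludes only the empty frame list, on which A (and B) raise IndexError at sequence[0].
def Pre_stabilize_formations (team_formations_per_frame : List (List (Int × String))) (min_persist : Int) : Prop :=
  team_formations_per_frame ≠ []
instance (team_formations_per_frame : List (List (Int × String))) (min_persist : Int) : Decidable (Pre_stabilize_formations team_formations_per_frame min_persist) := by unfold Pre_stabilize_formations; infer_instance

def pvWitness_stabilize_formations : (List (List (Int × String))) × Int :=
  ([[(1, "433"), (2, "442")], [(1, "433")], [(1, "352"), (2, "442")]], 2)

def Spec_stabilize_formations (team_formations_per_frame : List (List (Int × String))) (min_persist : Int) (out : List (List (Int × String))) : Prop := out = stabilize_formations_alt team_formations_per_frame min_persist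
instance (team_formations_per_frame : List (List (Int × String))) (min_persist : Int) (out : List (List (Int × String))) : Decidable (Spec_stabilize_formations team_formations_per_frame min_persist out) := by unfold Spec_stabilize_formations; infer_instance

-- ===== CLAIM (what is proved, stated in full; the proofs are below) =====
def Claim_equal_stabilize_formations : Prop := ∀ (team_formations_per_frame : List (List (Int × String))) (min_persist : Int), Dom_stabilize_formations team_formations_per_frame min_persist → Pre_stabilize_formations team_formations_per_frame min_persist → Spec_stabilize_formations team_formations_per_frame min_persist (stabilize_formations team_formations_per_frame min_persist)

-- ===== LEMMAS AND PROOFS =====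

theorem pvRunsAux_nil (x : String) : pvRunsAux x [] = [(x, 1)] := rfl

theorem pvRunsAux_cons (x v : String) (n : Nat) (rest : List (String × Nat)) :
    pvRunsAux x ((v, n) :: rest)
      = if x = v then (v, n + 1) :: rest else (x, 1) :: (v, n) :: rest := rfl

-- concatenating back the runs recovers the sequence
theorem pvRuns_flatten (xs : List String) :
    (pvRuns xs).flatMap (fun r => List.replicate r.2 r.1) = xs := by
  induction xs with
  | nil => rfl
  | cons x xs ih =>
    simp only [pvRuns]
    rcases h : pvRuns xs with _ | ⟨⟨v, n⟩, rest⟩ <;> rw [h] at ih <;> first | rw [pvRunsAux_nil] | rw [pvRunsAux_cons]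
    · simp at ih; simp [ih]
    · by_cases hx : x = v
      · subst hx
        rw [if_pos rfl]
        simp only [List.flatMap_cons, List.replicate_succ, List.cons_append] at ih ⊢
        simp [ih]
      · rw [if_neg hx]
        simp only [List.flatMap_cons] at ih ⊢
        simp [ih]

theorem pvRuns_pos (xs : List String) : ∀ r ∈ pvRuns xs, 0 < r.2 := by
  induction xs with
  | nil => simp [pvRuns]
  | cons x xs ih =>
    simp only [pvRuns]
    rcases h : pvRuns xs with _ | ⟨⟨v, n⟩, rest⟩ <;> rw [h] at ih <;> first | rw [pvRunsAux_nil] | rw [pvRunsAux_cons]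
    · simp
    · by_cases hx : x = v
      · subst hx
        rw [if_pos rfl]
        intro r hr
        simp only [List.mem_cons] at hr
        rcases hr with hr | hr
        · simp [hr]
        · exact ih r (by simp [hr])
      · rw [if_neg hx]
        intro r hr
        simp only [List.mem_cons] at hr
        rcases hr with hr | hr | hr
        · simp [hr]
        · exact ih r (by simp [hr])
        · exact ih r (by simp [hr])

theorem pvRuns_chain (xs : List String) :
    List.IsChain (fun a b : String × Nat => a.1 ≠ b.1) (pvRuns xs) := by
  induction xs with
  | nil => simp [pvRuns]
  | cons x xs ih =>
    simp only [pvRuns]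
    rcases h : pvRuns xs with _ | ⟨⟨v, n⟩, rest⟩ <;> rw [h] at ih <;> first | rw [pvRunsAux_nil] | rw [pvRunsAux_cons]
    · simp
    · by_cases hx : x = v
      · subst hx
        rw [if_pos rfl]
        cases rest with
        | nil => simp
        | cons b l =>
          rw [List.isChain_cons_cons] at ih ⊢
          exact ⟨ih.1, ih.2⟩
      · rw [if_neg hx]
        exact List.isChain_cons_cons.mpr ⟨hx, ih⟩

theorem pvRuns_head (x : String) (xs : List String) :
    ∃ n rest, pvRuns (x :: xs) = (x, n) :: rest := by
  simp only [pvRuns]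
  rcases pvRuns xs with _ | ⟨⟨v, n⟩, rest⟩
  · exact ⟨1, [], rfl⟩
  · rw [pvRunsAux_cons]
    by_cases hx : x = v
    · subst hx; exact ⟨n + 1, rest, by rw [if_pos rfl]⟩
    · exact ⟨1, (v, n) :: rest, by rw [if_neg hx]⟩

-- core lemma: inside a run, A's counter loop and B's index loop march in lockstep
-- (invariant: A's counter equals i - pos, where i is the next absolute frame index)
theorem pv_pair_run (mp pos : Int) (v : String) :
    ∀ (m : Nat) (i : Int) (cur : String) (acc : List String),
      (List.replicate m v).foldl (pvStepA mp) (cur, i - pos, v, acc)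
      = (((PySem.List.pyRange i (i + m) 1).foldl (pvEmitB mp pos v) (cur, acc)).1,
          i - pos + m, v,
          ((PySem.List.pyRange i (i + m) 1).foldl (pvEmitB mp pos v) (cur, acc)).2) := by
  intro m
  induction m with
  | zero =>
    intro i cur acc
    rw [PySem.List.pyRange_one_eq_nil (by omega)]
    simp
  | succ m ih =>
    intro i cur acc
    rw [List.replicate_succ, PySem.List.pyRange_one_cons (by push_cast; omega)]
    simp only [List.foldl_cons]
    have hstepA : pvStepA mp (cur, i - pos, v, acc) v
        = ((if i ≥ pos + mp - 1 then v else cur), i - pos + 1, v,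
           acc ++ [if i ≥ pos + mp - 1 then v else cur]) := by
      simp only [pvStepA]
      split_ifs <;> simp_all <;> omega
    have hstepB : pvEmitB mp pos v (cur, acc) i
        = ((if i ≥ pos + mp - 1 then v else cur),
           acc ++ [if i ≥ pos + mp - 1 then v else cur]) := by
      simp [pvEmitB]
    rw [hstepA, hstepB]
    have hx := ih (i + 1) (if i ≥ pos + mp - 1 then v else cur)
        (acc ++ [if i ≥ pos + mp - 1 then v else cur])
    rw [show i + 1 - pos = i - pos + 1 from by omega] at hx
    rw [show i + 1 + (m : Int) = i + ((m + 1 : Nat) : Int) from by push_cast; omega] at hx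
    rw [hx]
    have : i - pos + 1 + (m : Int) = i - pos + ((m + 1 : Nat) : Int) := by push_cast; omega
    rw [this]

-- one whole non-first run: A resets candidate and counter, then the lockstep lemma
theorem pv_run_all (mp : Int) (n : Nat) (hn : 0 < n) (pos : Int) (v cand cur : String)
    (cnt : Int) (acc : List String) (hne : v ≠ cand) (hpos : 1 ≤ pos) :
    (List.replicate n v).foldl (pvStepA mp) (cur, cnt, cand, acc)
    = (((PySem.List.pyRange (max pos 1) (pos + n) 1).foldl (pvEmitB mp pos v) (cur, acc)).1,
        (n : Int), v,
        ((PySem.List.pyRange (max pos 1) (pos + n) 1).foldl (pvEmitB mp pos v) (cur, acc)).2) := by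
  obtain ⟨m, rfl⟩ : ∃ m, n = m + 1 := ⟨n - 1, by omega⟩
  rw [List.replicate_succ, max_eq_left hpos, PySem.List.pyRange_one_cons (by push_cast; omega)]
  simp only [List.foldl_cons]
  have hstepA : pvStepA mp (cur, cnt, cand, acc) v
      = ((if pos ≥ pos + mp - 1 then v else cur), 1, v,
         acc ++ [if pos ≥ pos + mp - 1 then v else cur]) := by
    simp only [pvStepA]
    split_ifs <;> simp_all; omega
  have hstepB : pvEmitB mp pos v (cur, acc) pos
      = ((if pos ≥ pos + mp - 1 then v else cur),
         acc ++ [if pos ≥ pos + mp - 1 then v else cur]) := by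
    simp [pvEmitB]
  rw [hstepA, hstepB]
  have hx := pv_pair_run mp pos v m (pos + 1) (if pos ≥ pos + mp - 1 then v else cur)
      (acc ++ [if pos ≥ pos + mp - 1 then v else cur])
  rw [show pos + 1 - pos = (1 : Int) from by omega] at hx
  rw [show pos + 1 + (m : Int) = pos + ((m + 1 : Nat) : Int) from by push_cast; omega] at hx
  rw [hx]
  have : (1 : Int) + (m : Int) = ((m + 1 : Nat) : Int) := by push_cast; omega
  rw [this]

-- walking the remaining runs keeps A's fold and B's fold in step
theorem pv_walk (mp : Int) :
    ∀ (rs : List (String × Nat)) (pos : Int) (cur cand : String) (cnt : Int)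
      (acc : List String),
      1 ≤ pos →
      (∀ r ∈ rs, 0 < r.2) →
      List.IsChain (fun a b : String × Nat => a.1 ≠ b.1) rs →
      (∀ v n rest, rs = (v, n) :: rest → v ≠ cand) →
      ((rs.flatMap (fun r => List.replicate r.2 r.1)).foldl (pvStepA mp) (cur, cnt, cand, acc)).1
        = (rs.foldl (pvStepB mp) (pos, cur, acc)).2.1
      ∧ ((rs.flatMap (fun r => List.replicate r.2 r.1)).foldl (pvStepA mp) (cur, cnt, cand, acc)).2.2.2
        = (rs.foldl (pvStepB mp) (pos, cur, acc)).2.2 := by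
  intro rs
  induction rs with
  | nil => intro pos cur cand cnt acc _ _ _ _; exact ⟨rfl, rfl⟩
  | cons r rest ih =>
    intro pos cur cand cnt acc hpos hlen hchain hhd
    obtain ⟨v, n⟩ := r
    have hn : 0 < n := hlen (v, n) (by simp)
    have hne : v ≠ cand := hhd v n rest rfl
    simp only [List.flatMap_cons, List.foldl_append, List.foldl_cons]
    rw [pv_run_all mp n hn pos v cand cur cnt acc hne hpos]
    have hB : pvStepB mp (pos, cur, acc) (v, n)
        = (pos + (n : Int),
           ((PySem.List.pyRange (max pos 1) (pos + n) 1).foldl (pvEmitB mp pos v) (cur, acc)).1,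
           ((PySem.List.pyRange (max pos 1) (pos + n) 1).foldl (pvEmitB mp pos v) (cur, acc)).2) := by
      simp [pvStepB]
    rw [hB]
    apply ih
    · omega
    · intro r hr; exact hlen r (by simp [hr])
    · exact hchain.of_cons
    · intro v' n' rest' hrest
      subst hrest
      exact (List.isChain_cons_cons.mp hchain).1.symm

-- the two per-sequence stabilizers agree on every sequence
theorem pvStab_eq (mp : Int) (seq : List String) : pvStabA mp seq = pvStabB mp seq := by
  cases seq with
  | nil => rfl
  | cons s0 rest =>
    obtain ⟨n, rs', hruns⟩ := pvRuns_head s0 rest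
    have hflat := pvRuns_flatten (s0 :: rest)
    rw [hruns] at hflat
    have hn : 0 < n := pvRuns_pos (s0 :: rest) (s0, n) (by rw [hruns]; simp)
    have hchain := pvRuns_chain (s0 :: rest)
    rw [hruns] at hchain
    obtain ⟨m, rfl⟩ : ∃ m, n = m + 1 := ⟨n - 1, by omega⟩
    simp only [List.flatMap_cons, List.replicate_succ, List.cons_append, List.cons.injEq] at hflat
    obtain ⟨-, hrest⟩ := hflat
    simp only [pvStabA, pvStabB, hruns, List.foldl_cons]
    rw [show rest = List.replicate m s0 ++ rs'.flatMap (fun r => List.replicate r.2 r.1)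
        from hrest.symm]
    rw [List.foldl_append]
    have hA1 := pv_pair_run mp 0 s0 m 1 s0 ([] : List String)
    rw [show (1 : Int) - 0 = 1 from by omega] at hA1
    rw [hA1]
    have hB1 : pvStepB mp (0, s0, []) (s0, m + 1)
        = ((0 : Int) + ((m + 1 : Nat) : Int),
           ((PySem.List.pyRange (max (0 : Int) 1) (0 + ((m + 1 : Nat) : Int)) 1).foldl
              (pvEmitB mp 0 s0) (s0, [])).1,
           ((PySem.List.pyRange (max (0 : Int) 1) (0 + ((m + 1 : Nat) : Int)) 1).foldl
              (pvEmitB mp 0 s0) (s0, [])).2) := by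
      simp [pvStepB]
    rw [hB1]
    rw [show max (0 : Int) 1 = 1 from by simp,
        show (0 : Int) + ((m + 1 : Nat) : Int) = 1 + (m : Int) from by push_cast; omega]
    exact (pv_walk mp rs' (1 + (m : Int)) _ s0 (1 + (m : Int)) _
      (by omega)
      (fun r hr => pvRuns_pos (s0 :: rest) r (by rw [hruns]; simp [hr]))
      hchain.of_cons
      (fun v' n' rest' hrest' => by
        subst hrest'
        exact (List.isChain_cons_cons.mp hchain).1.symm)).2

-- ===== VERDICT (by name: the statement is the Claim_ definition above) =====
theorem stabilize_formations_spec : Claim_equal_stabilize_formations := by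
  intro tf mp _ _
  unfold Spec_stabilize_formations stabilize_formations stabilize_formations_alt
  dsimp only
  rw [pvStab_eq, pvStab_eq, PySem.List.foldl_append_singleton_eq_map]
  simp
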